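-- pv_equiv track=rewrite | github.com/mbpfws/speckit-buff-v2 | src/specify_cli/architecture/framework_patterns.py | validate_pattern_compliance
-- ===== SOURCE A (Python) =====
-- from typing import Dict, List, Optional, Tuple, Any
--
-- def validate_pattern_compliance(detected_patterns: Dict[str, Any]) -> Dict[str, Any]:
--     """
--     Validate pattern compliance with best practices
--
--     Args:
--         detected_patterns: Detected patterns data
--
--     Returns:
--         Compliance validation results
--     """
--     compliance_results = {
--         'compliant': [],
--         'non_compliant': [],
--         'warnings': [],
--         'suggestions': []
--     }
--
--     # Check for common compliance issues
--     for pattern in detected_patterns.get('framework_patterns', []):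
--         framework = pattern.split('_')[0]
--
--         # Framework-specific compliance checks
--         if framework == 'react':
--             if 'hooks' in pattern:
--                 compliance_results['suggestions'].append(
--                     'Ensure hooks are used according to React rules'
--                 )
--             if 'redux' in pattern:
--                 compliance_results['suggestions'].append(
--                     'Consider using Redux Toolkit for modern Redux patterns'
--                 )
--
--         elif framework == 'django':
--             if 'mvc' in pattern:
--                 compliance_results['suggestions'].append(
--                     'Ensure proper separation of concerns in MVC pattern'
--                 )
--             if 'orm' in pattern:
--                 compliance_results['suggestions'].append(
--                     'Check for N+1 query issues and optimize database queries'
--                 )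
--
--         elif framework == 'spring':
--             if 'dependency_injection' in pattern:
--                 compliance_results['suggestions'].append(
--                     'Ensure proper dependency injection configuration'
--                 )
--             if 'jpa' in pattern:
--                 compliance_results['suggestions'].append(
--                     'Check for proper JPA entity relationships and transactions'
--                 )
--
--     return compliance_results
-- ===== SOURCE B (Python) =====
-- # Flat rule-table scan: no split(), no per-framework dispatch -- each pattern is
-- # tested against every rule via the prefix trick (pattern + '_').startswith(prefix),
-- # which is equivalent to pattern.split('_')[0] == framework.
-- RULES = [
--     ('react_', 'hooks', 'Ensure hooks are used according to React rules'),
--     ('react_', 'redux', 'Consider using Redux Toolkit for modern Redux patterns'),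
--     ('django_', 'mvc', 'Ensure proper separation of concerns in MVC pattern'),
--     ('django_', 'orm', 'Check for N+1 query issues and optimize database queries'),
--     ('spring_', 'dependency_injection', 'Ensure proper dependency injection configuration'),
--     ('spring_', 'jpa', 'Check for proper JPA entity relationships and transactions'),
-- ]
--
--
-- def validate_pattern_compliance(detected_patterns):
--     return {
--         'compliant': [],
--         'non_compliant': [],
--         'warnings': [],
--         'suggestions': [
--             msg
--             for pattern in detected_patterns.get('framework_patterns', [])
--             for prefix, marker, msg in RULES
--             if (pattern + '_').startswith(prefix) and marker in pattern
--         ],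
--     }
-- ===== Notes on version B (the rewrite author's own statement) =====
-- stated objective: alternative
-- what changed: Drops split('_') and the per-framework if/elif dispatch entirely: B scans one flat (prefix, marker, suggestion) rule table per pattern, testing (pattern + '_').startswith(prefix) instead of comparing pattern.split('_')[0] against framework names.
import Mathlib
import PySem

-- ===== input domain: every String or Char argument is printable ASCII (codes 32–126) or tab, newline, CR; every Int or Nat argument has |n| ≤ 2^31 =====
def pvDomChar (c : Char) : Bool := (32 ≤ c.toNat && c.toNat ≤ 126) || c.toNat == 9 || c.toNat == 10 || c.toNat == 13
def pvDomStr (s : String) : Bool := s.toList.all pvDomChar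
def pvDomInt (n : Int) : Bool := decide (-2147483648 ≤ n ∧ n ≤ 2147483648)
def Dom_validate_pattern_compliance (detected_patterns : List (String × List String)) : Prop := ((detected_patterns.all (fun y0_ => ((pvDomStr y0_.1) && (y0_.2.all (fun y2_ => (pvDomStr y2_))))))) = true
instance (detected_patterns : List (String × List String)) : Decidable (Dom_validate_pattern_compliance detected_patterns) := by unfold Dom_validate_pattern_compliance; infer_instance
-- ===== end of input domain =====

-- B replaces A's split('_')-and-dispatch if/elif chain by a flat rule-table scan with a
-- prefix test (pattern + '_').startswith(prefix); same return value on every input (A is total).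

-- ===== PORT A =====
-- A's per-pattern loop body: split off the framework prefix, then the if/elif chain,
-- appending suggestions in branch order.
def pvAStep (acc : List String) (pattern : String) : List String :=
  let framework := PySem.List.pyGetD ((PySem.Str.split? pattern "_").getD []) 0 ""
  if framework == "react" then
    let acc := if PySem.Str.isIn "hooks" pattern then acc ++ ["Ensure hooks are used according to React rules"] else acc
    if PySem.Str.isIn "redux" pattern then acc ++ ["Consider using Redux Toolkit for modern Redux patterns"] else acc
  else if framework == "django" then
    let acc := if PySem.Str.isIn "mvc" pattern then acc ++ ["Ensure proper separation of concerns in MVC pattern"] else acc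
    if PySem.Str.isIn "orm" pattern then acc ++ ["Check for N+1 query issues and optimize database queries"] else acc
  else if framework == "spring" then
    let acc := if PySem.Str.isIn "dependency_injection" pattern then acc ++ ["Ensure proper dependency injection configuration"] else acc
    if PySem.Str.isIn "jpa" pattern then acc ++ ["Check for proper JPA entity relationships and transactions"] else acc
  else acc

def validate_pattern_compliance (detected_patterns : List (String × List String)) : List (String × List String) :=
  let suggestions := (PySem.Dict.getD ⟨detected_patterns⟩ "framework_patterns" []).foldl pvAStep []
  [("compliant", []), ("non_compliant", []), ("warnings", []), ("suggestions", suggestions)]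

-- ===== PORT B =====
-- B's flat rule table: (prefix, marker, suggestion) triples, in A's emission order.
def pvRules : List (String × String × String) :=
  [("react_", "hooks", "Ensure hooks are used according to React rules"),
   ("react_", "redux", "Consider using Redux Toolkit for modern Redux patterns"),
   ("django_", "mvc", "Ensure proper separation of concerns in MVC pattern"),
   ("django_", "orm", "Check for N+1 query issues and optimize database queries"),
   ("spring_", "dependency_injection", "Ensure proper dependency injection configuration"),
   ("spring_", "jpa", "Check for proper JPA entity relationships and transactions")]

def validate_pattern_compliance_alt (detected_patterns : List (String × List String)) : List (String × List String) :=
  [("compliant", []), ("non_compliant", []), ("warnings", []),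
   ("suggestions",
     (PySem.Dict.getD ⟨detected_patterns⟩ "framework_patterns" []).flatMap (fun pattern =>
       pvRules.filterMap (fun r =>
         if PySem.Str.startswith (pattern ++ "_") r.1 && PySem.Str.isIn r.2.1 pattern
         then some r.2.2 else none)))]

-- ===== PRECONDITION & SPEC =====
def Spec_validate_pattern_compliance (detected_patterns : List (String × List String)) (out : List (String × List String)) : Prop := out = validate_pattern_compliance_alt detected_patterns
instance (detected_patterns : List (String × List String)) (out : List (String × List String)) : Decidable (Spec_validate_pattern_compliance detected_patterns out) := by unfold Spec_validate_pattern_compliance; infer_instance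

-- ===== CLAIM (what is proved, stated in full; the proofs are below) =====
def Claim_equal_validate_pattern_compliance : Prop := ∀ (detected_patterns : List (String × List String)), Dom_validate_pattern_compliance detected_patterns → Spec_validate_pattern_compliance detected_patterns (validate_pattern_compliance detected_patterns)

-- ===== LEMMAS AND PROOFS =====

-- The first element emitted by splitOn.go is cur.reverse ++ (chars of l before the first '_').
lemma pv_go_head (l : List Char) : ∀ (fuel : Nat) (cur : List Char) (acc : List (List Char)),
    l.length < fuel →
    ∃ t, PySem.Chars.splitOn.go ['_'] fuel l cur acc
        = acc.reverse ++ ((cur.reverse ++ l.takeWhile (· != '_')) :: t) := by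
  induction l with
  | nil =>
    intro fuel cur acc h
    match fuel with
    | fuel + 1 => exact ⟨[], by simp [PySem.Chars.splitOn.go]⟩
  | cons c rest ih =>
    intro fuel cur acc h
    match fuel with
    | fuel + 1 =>
      by_cases hc : c = '_'
      · subst hc
        obtain ⟨t, ht⟩ := ih fuel [] (cur.reverse :: acc) (by simpa using h)
        exact ⟨rest.takeWhile (· != '_') :: t, by
          simp [PySem.Chars.splitOn.go, ht]⟩
      · obtain ⟨t, ht⟩ := ih fuel (c :: cur) acc (by simpa using h)
        refine ⟨t, ?_⟩
        have hpre : (['_'] : List Char).isPrefixOf (c :: rest) = false := by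
          simp [List.isPrefixOf]; exact fun h' => hc h'.symm
        simp [PySem.Chars.splitOn.go, hpre, ht, hc]

-- A's framework = pattern.split('_')[0] is the prefix of the pattern before the first '_'.
set_option maxRecDepth 4096 in
lemma pv_head_split (p : String) :
    PySem.List.pyGetD ((PySem.Str.split? p "_").getD []) 0 ""
      = String.ofList (p.toList.takeWhile (· != '_')) := by
  have hlen : p.length = p.toList.length := rfl
  obtain ⟨t, ht⟩ := pv_go_head p.toList (p.length + 1) [] [] (by rw [hlen]; omega)
  rw [show PySem.Str.split? p "_" = some (List.map String.ofList
        (PySem.Chars.splitOn.go ['_'] (p.length + 1) p.toList [] [])) from rfl, ht]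
  simp [PySem.List.pyGetD, PySem.List.pyGet?, PySem.List.pyIdx?]

-- B's prefix trick: (fl ++ '_') prefixes (l ++ '_') iff fl is exactly the part of l before the first '_'.
lemma pv_prefix_iff (fl : List Char) (h : '_' ∉ fl) : ∀ l : List Char,
    (fl ++ ['_']).isPrefixOf (l ++ ['_']) = (l.takeWhile (· != '_') == fl) := by
  induction fl with
  | nil =>
    intro l
    cases l with
    | nil => simp
    | cons c rest =>
      by_cases hc : c = '_'
      · simp [List.isPrefixOf, hc]
      · have h1 : (('_' : Char) == c) = false := by
          simp; exact fun hh => hc hh.symm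
        simp [List.isPrefixOf, hc, h1]
  | cons a fl' ih =>
    intro l
    have ha : a ≠ '_' := fun hh => h (hh ▸ List.mem_cons_self)
    have h' : '_' ∉ fl' := fun hh => h (List.mem_cons_of_mem _ hh)
    cases l with
    | nil => simp [List.isPrefixOf, List.takeWhile]
    | cons c rest =>
      by_cases hc : c = '_'
      · subst hc
        have h1 : (a == '_') = false := by simp [ha]
        simp [List.isPrefixOf, h1]
      · by_cases hca : c = a
        · subst hca
          simp [hc, ih h' rest]
        · have h1 : (a == c) = false := by
            simp; exact fun hh => hca hh.symm
          have h2 : (c == a) = false := by simp [hca]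
          simp [List.isPrefixOf, hc, h1, h2]

-- B's string-level condition, rewritten to a comparison with the pre-'_' prefix of the pattern.
lemma pv_startswith_eq (pre f p : String) (hpre : pre.toList = f.toList ++ ['_'])
    (hf : '_' ∉ f.toList) :
    PySem.Str.startswith (p ++ "_") pre = (p.toList.takeWhile (· != '_') == f.toList) := by
  have : (p ++ "_").toList = p.toList ++ ['_'] := by
    rw [String.toList_append]; rfl
  simp only [PySem.Str.startswith, PySem.Chars.startswith, this, hpre]
  exact pv_prefix_iff f.toList hf p.toList

-- String equality through String.ofList.
lemma pv_ofList_beq (F fl : List Char) (s : String) (hs : s = String.ofList fl) :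
    (String.ofList F == s) = (F == fl) := by
  subst hs
  by_cases h : F = fl
  · simp [h]
  · have h1 : (String.ofList F == String.ofList fl) = false := by
      simp [beq_eq_false_iff_ne]; exact fun hh => h (String.ofList_inj.mp hh)
    have h2 : (F == fl) = false := by simp [h]
    rw [h1, h2]

-- B's per-pattern contribution (the inner comprehension of Source B)
def pvBContrib (pattern : String) : List String :=
  pvRules.filterMap (fun r =>
    if PySem.Str.startswith (pattern ++ "_") r.1 && PySem.Str.isIn r.2.1 pattern
    then some r.2.2 else none)

set_option maxRecDepth 8192 in
lemma pvStep_eq (acc : List String) (p : String) :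
    pvAStep acc p = acc ++ pvBContrib p := by
  have hr : PySem.Str.startswith (p ++ "_") "react_" = (p.toList.takeWhile (· != '_') == "react".toList) :=
    pv_startswith_eq "react_" "react" p (by decide) (by decide)
  have hd : PySem.Str.startswith (p ++ "_") "django_" = (p.toList.takeWhile (· != '_') == "django".toList) :=
    pv_startswith_eq "django_" "django" p (by decide) (by decide)
  have hs : PySem.Str.startswith (p ++ "_") "spring_" = (p.toList.takeWhile (· != '_') == "spring".toList) :=
    pv_startswith_eq "spring_" "spring" p (by decide) (by decide)
  have er := pv_ofList_beq (p.toList.takeWhile (· != '_')) "react".toList "react" (by decide)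
  have ed := pv_ofList_beq (p.toList.takeWhile (· != '_')) "django".toList "django" (by decide)
  have es := pv_ofList_beq (p.toList.takeWhile (· != '_')) "spring".toList "spring" (by decide)
  unfold pvAStep pvBContrib pvRules
  rw [pv_head_split p]
  by_cases h1 : p.toList.takeWhile (· != '_') = "react".toList
  · simp only [List.filterMap, hr, hd, hs, h1]
    simp
    split_ifs <;> simp [*]
  · by_cases h2 : p.toList.takeWhile (· != '_') = "django".toList
    · simp only [List.filterMap, hr, hd, hs, h2]
      simp
      split_ifs <;> simp [*]
    · by_cases h3 : p.toList.takeWhile (· != '_') = "spring".toList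
      · simp only [List.filterMap, hr, hd, hs, h3]
        simp
        split_ifs <;> simp [*]
      · have h1' : p.toList.takeWhile (· != '_') ≠ ['r','e','a','c','t'] := h1
        have h2' : p.toList.takeWhile (· != '_') ≠ ['d','j','a','n','g','o'] := h2
        have h3' : p.toList.takeWhile (· != '_') ≠ ['s','p','r','i','n','g'] := h3
        simp only [List.filterMap, hr, hd, hs, er, ed, es]
        simp [h1', h2', h3']

-- ===== VERDICT (by name: the statement is the Claim_ definition above) =====
theorem validate_pattern_compliance_spec : Claim_equal_validate_pattern_compliance := by
  intro dp _
  unfold Spec_validate_pattern_compliance validate_pattern_compliance validate_pattern_compliance_alt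
  have hstep : pvAStep = fun acc p => acc ++ pvBContrib p :=
    funext fun acc => funext fun p => pvStep_eq acc p
  simp only [hstep, PySem.List.foldl_append_eq_flatMap, List.nil_append]
  rfl
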